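-- pv_equiv track=rewrite | github.com/shank252127/Data_Structure_And_Algorithms | Greedy Algorithms/H03.py | solve
-- ===== SOURCE A (Python) =====
-- from heapq import heappop, heappush, heapify
--
-- def solve(A, B, C):
--     # Creating empty heap
--     heap = []
--     heapify(heap)
--     for i in C:
--         heappush(heap, i)
--
--     maxVal = 0
--     minVal = 0
--     arrMax = C
--     arrMax.sort()
--     for i in range(A):
--         #handling max value
--         a = arrMax.pop()
--         #inserting the value a-1 again into the list if it's > 1;
--         if( a-1 >0):
--             arrMax.append(a-1)
--         maxVal = maxVal + a
--         arrMax.sort()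
--         #handling min value
--         m=heappop(heap)
--         #inserting the value m-1 again into the heap if it's > 1;
--         if(m-1>0):
--             heappush(heap, m-1)
--         minVal = minVal + m
--
--     return [maxVal,minVal]
-- ===== SOURCE B (Python) =====
-- def solve(A, B, C):
--     asc = sorted(C)
--     # min side: each element v (ascending) is drained v, v-1, ..., 1 before the
--     # next element is touched, so its contribution has a closed form.
--     minVal = 0
--     budget = A
--     for v in asc:
--         if budget <= 0:
--             break
--         cost = v if v > 1 else 1
--         if budget >= cost:
--             minVal += v if v <= 1 else v * (v + 1) // 2
--             budget -= cost
--         else: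
--             minVal += budget * v - budget * (budget - 1) // 2
--             budget = 0
--     # max side: run-length encoded descending multiset kept as a stack
--     # (runs[-1] is the run of the current maximum); every round is O(1).
--     runs = []
--     for v in asc:
--         if runs and runs[-1][0] == v:
--             runs[-1][1] += 1
--         else:
--             runs.append([v, 1])
--     maxVal = 0
--     for _ in range(A):
--         v, c = runs[-1]
--         maxVal += v
--         if v - 1 > 0:
--             if c == 1:
--                 if len(runs) >= 2 and runs[-2][0] == v - 1:
--                     runs.pop()
--                     runs[-1][1] += 1
--                 else:
--                     runs[-1] = [v - 1, 1]
--             else: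
--                 runs[-1][1] = c - 1
--                 if len(runs) >= 2 and runs[-2][0] == v - 1:
--                     runs[-2][1] += 1
--                 else:
--                     runs.insert(len(runs) - 1, [v - 1, 1])
--         else:
--             if c == 1:
--                 runs.pop()
--             else:
--                 runs[-1][1] = c - 1
--     return [maxVal, minVal]
-- ===== Notes on version B (the rewrite author's own statement) =====
-- stated objective: faster
-- what changed: Replaces A's per-round re-sort and heap simulation by one initial sort followed by a closed-form per-element drain formula for the min side and a run-length-encoded descending stack with O(1) rounds for the max side.
import Mathlib
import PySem

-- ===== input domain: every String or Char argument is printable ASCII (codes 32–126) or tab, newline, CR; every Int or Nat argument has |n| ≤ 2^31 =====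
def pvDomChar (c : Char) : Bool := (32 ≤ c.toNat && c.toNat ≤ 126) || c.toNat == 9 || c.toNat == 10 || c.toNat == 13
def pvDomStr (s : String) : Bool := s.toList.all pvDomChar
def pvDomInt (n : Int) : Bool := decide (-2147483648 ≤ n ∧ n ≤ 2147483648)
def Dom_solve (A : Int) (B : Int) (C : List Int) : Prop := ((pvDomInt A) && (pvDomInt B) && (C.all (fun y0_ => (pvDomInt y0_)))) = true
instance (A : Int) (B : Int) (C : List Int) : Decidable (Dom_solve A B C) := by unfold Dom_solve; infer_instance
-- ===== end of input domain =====

-- B sorts once and then computes the min side by a closed-form per-element drain and the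
-- max side on a run-length-encoded descending stack; equivalence is about the RETURN value
-- only — Python A sorts and pops the caller's list C in place, B does not mutate C.

-- heapq model used by Port A (A uses heapq): a heap is its multiset of values, heappush
-- appends, heappop removes one occurrence of the minimum value.  Exact at the level of
-- values: elements are Ints, so tied elements are indistinguishable.
def hpush (h : List Int) (x : Int) : List Int := h ++ [x]

def hpop? (h : List Int) : Option (Int × List Int) :=
  match PySem.List.min? h (fun x => x) with
  | none => none          -- heappop on an empty heap: IndexError
  | some m => some (m, h.erase m)

-- Option-threaded `for _ in range(n)` loop (shared combinator; none = the body raised).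
def iterOpt {σ : Type} (f : σ → Option σ) : Nat → σ → Option σ
  | 0, s => some s
  | n+1, s => (f s).bind (iterOpt f n)

-- ===== PORT A =====
-- the max-value half of A's loop body: a = arrMax.pop(); if a-1>0: append; re-sort
def stepAmax (s : List Int × Int) : Option (List Int × Int) :=
  match PySem.List.pop? s.1 with
  | none => none
  | some (a, rest) =>
    let arr := if a - 1 > 0 then rest ++ [a - 1] else rest
    some (PySem.List.sorted arr (fun x => x), s.2 + a)

-- the min-value half of A's loop body: m = heappop(heap); if m-1>0: heappush(heap, m-1)
def stepAmin (s : List Int × Int) : Option (List Int × Int) :=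
  match hpop? s.1 with
  | none => none
  | some (m, h1) =>
    some (if m - 1 > 0 then hpush h1 (m - 1) else h1, s.2 + m)

def stepA (s : (List Int × Int) × (List Int × Int)) : Option ((List Int × Int) × (List Int × Int)) :=
  (stepAmax s.1).bind (fun p => (stepAmin s.2).map (fun q => (p, q)))

def solve (A : Int) (B : Int) (C : List Int) : List Int :=
  let heap := C.foldl hpush []                              -- heapify([]); heappush each i of C
  let arrMax := PySem.List.sorted C (fun x => x)            -- arrMax = C; arrMax.sort()
  match iterOpt stepA A.toNat ((arrMax, 0), (heap, 0)) with -- for i in range(A)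
  | some ((_, mx), (_, mn)) => [mx, mn]
  | none => []                                              -- IndexError: excluded by Pre_solve

-- ===== PORT B =====
-- min side of Source B: scan the ascending sort once; element v contributes the closed-form
-- drain v + (v-1) + … (truncated by the remaining budget), no loop over rounds.
def minScan : List Int → Int → Int → Int
  | [], _, acc => acc
  | v :: rest, budget, acc =>
    if budget ≤ 0 then acc
    else if (if v > 1 then v else 1) ≤ budget then
      minScan rest (budget - (if v > 1 then v else 1))
        (acc + (if v ≤ 1 then v else PySem.Int.floordiv (v * (v + 1)) 2))
    else
      acc + budget * v - PySem.Int.floordiv (budget * (budget - 1)) 2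

-- Source B's RLE builder: push one value onto the run stack (head = python's runs[-1], the max)
def runPush (rs : List (Int × Int)) (v : Int) : List (Int × Int) :=
  match rs with
  | (w, c) :: t => if w = v then (w, c + 1) :: t else (v, 1) :: (w, c) :: t
  | [] => [(v, 1)]

def buildRuns (asc : List Int) : List (Int × Int) := asc.foldl runPush []

-- one round of Source B's max loop on the run stack (none = runs[-1] on empty: IndexError)
def maxStep (s : List (Int × Int) × Int) : Option (List (Int × Int) × Int) :=
  match s.1 with
  | [] => none
  | (v, c) :: t =>
    let acc := s.2 + v
    if v - 1 > 0 then
      if c = 1 then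
        match t with
        | (w, d) :: t2 => if w = v - 1 then some ((w, d + 1) :: t2, acc)
                          else some ((v - 1, 1) :: (w, d) :: t2, acc)
        | [] => some ([(v - 1, 1)], acc)
      else
        match t with
        | (w, d) :: t2 => if w = v - 1 then some ((v, c - 1) :: (w, d + 1) :: t2, acc)
                          else some ((v, c - 1) :: (v - 1, 1) :: (w, d) :: t2, acc)
        | [] => some ([(v, c - 1), (v - 1, 1)], acc)
    else
      if c = 1 then some (t, acc) else some ((v, c - 1) :: t, acc)

def solve_alt (A : Int) (B : Int) (C : List Int) : List Int :=
  let asc := PySem.List.sorted C (fun x => x)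
  let mn := minScan asc A 0
  match iterOpt maxStep A.toNat (buildRuns asc, 0) with
  | some (_, mx) => [mx, mn]
  | none => []                                              -- IndexError: excluded by Pre_solve

-- ===== PRECONDITION & SPEC =====
-- Pre_solve excludes exactly the inputs on which A raises IndexError (pop from an empty
-- list / heappop from an empty heap): each element v supplies max(v,1) pops before it is
-- gone, so both sides run dry after sum(max(v,1)) rounds.
def Pre_solve (A : Int) (B : Int) (C : List Int) : Prop :=
  A ≤ (C.map (fun v => max v 1)).sum
instance (A : Int) (B : Int) (C : List Int) : Decidable (Pre_solve A B C) := by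
  unfold Pre_solve; infer_instance

def pvWitness_solve : Int × Int × List Int := (3, 0, [2, -1, 4])

def Spec_solve (A : Int) (B : Int) (C : List Int) (out : List Int) : Prop := out = solve_alt A B C
instance (A : Int) (B : Int) (C : List Int) (out : List Int) : Decidable (Spec_solve A B C out) := by unfold Spec_solve; infer_instance

-- ===== CLAIM (what is proved, stated in full; the proofs are below) =====
def Claim_equal_solve : Prop := ∀ (A : Int) (B : Int) (C : List Int), Dom_solve A B C → Pre_solve A B C → Spec_solve A B C (solve A B C)

-- ===== LEMMAS AND PROOFS =====

-- total number of pops a multiset of values supports: sum of max(v,1)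
def totalCost (l : List Int) : Int := (l.map (fun v => max v 1)).sum

-- invariant of Source B's run stack: counts ≥ 1, values strictly decreasing from the head
inductive RunsOK : List (Int × Int) → Prop
  | nil : RunsOK []
  | cons {v c : Int} {t : List (Int × Int)} :
      1 ≤ c → (∀ q ∈ t, q.1 < v) → RunsOK t → RunsOK ((v, c) :: t)

-- the ascending multiset a run stack denotes (head of rs = largest values = end of list)
def expand : List (Int × Int) → List Int
  | [] => []
  | (v, c) :: t => expand t ++ List.replicate c.toNat v

-- abstract view of A's min loop on the sorted list: pop the head, re-cons m-1 if > 0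
def headStep (s : List Int × Int) : Option (List Int × Int) :=
  match s.1 with
  | [] => none
  | m :: t => some (if m - 1 > 0 then (m - 1) :: t else t, s.2 + m)

theorem foldl_hpush (C acc : List Int) : C.foldl hpush acc = acc ++ C := by
  induction C generalizing acc with
  | nil => simp
  | cons x xs ih => simp [List.foldl, hpush, ih]

theorem iterOpt_add {σ : Type} (f : σ → Option σ) (m n : Nat) (s : σ) :
    iterOpt f (m + n) s = (iterOpt f m s).bind (iterOpt f n) := by
  induction m generalizing s with
  | zero => simp [iterOpt]
  | succ m ih =>
    have h : m + 1 + n = (m + n) + 1 := by omega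
    rw [h]
    simp only [iterOpt]
    cases f s with
    | none => simp
    | some s' => simpa using ih s'

-- the interleaved A-loop is the product of its two independent halves
theorem iterOpt_prod {σ τ : Type} (f : σ → Option σ) (g : τ → Option τ) (n : Nat) :
    ∀ (p : σ) (q : τ),
      iterOpt (fun s => (f s.1).bind (fun p' => (g s.2).map (fun q' => (p', q')))) n (p, q)
        = match iterOpt f n p, iterOpt g n q with
          | some p', some q' => some (p', q')
          | _, _ => none := by
  induction n with
  | zero => intro p q; simp [iterOpt]
  | succ n ih =>
    intro p q
    simp only [iterOpt]
    cases hf : f p with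
    | none => simp
    | some p' =>
      cases hg : g q with
      | none => cases hfn : iterOpt f n p' <;> simp [hfn]
      | some q' => simp [ih p' q']

theorem totalCost_perm {l l' : List Int} (h : l.Perm l') : totalCost l = totalCost l' := by
  exact List.Perm.sum_eq (h.map _)

theorem mem_expand {x : Int} {rs : List (Int × Int)} (h : x ∈ expand rs) :
    ∃ q ∈ rs, x = q.1 := by
  induction rs with
  | nil => simp [expand] at h
  | cons p t ih =>
    obtain ⟨v, c⟩ := p
    simp only [expand] at h
    rcases List.mem_append.mp h with h1 | h2
    · obtain ⟨q, hq, hx⟩ := ih h1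
      exact ⟨q, List.mem_cons_of_mem _ hq, hx⟩
    · exact ⟨(v, c), List.mem_cons_self, List.eq_of_mem_replicate h2⟩

theorem expand_pairwise {rs : List (Int × Int)} (h : RunsOK rs) :
    (expand rs).Pairwise (· ≤ ·) := by
  induction h with
  | nil => simp [expand]
  | @cons v c t hc hlt ht ih =>
    simp only [expand]
    rw [List.pairwise_append]
    refine ⟨ih, List.pairwise_replicate.mpr (Or.inr le_rfl), ?_⟩
    intro x hx y hy
    obtain ⟨q, hq, rfl⟩ := mem_expand hx
    rw [List.eq_of_mem_replicate hy]
    exact le_of_lt (hlt q hq)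

theorem expand_cons_split (v c : Int) (t : List (Int × Int)) (hc : 1 ≤ c) :
    expand ((v, c) :: t) = expand ((v, c - 1) :: t) ++ [v] := by
  simp only [expand]
  have h1 : c.toNat = (c - 1).toNat + 1 := by omega
  rw [h1, List.replicate_succ', ← List.append_assoc]

-- one round: Source B's maxStep tracks A's pop-append-re-sort on the expanded multiset
theorem maxStep_sim {v c : Int} {t : List (Int × Int)} (h : RunsOK ((v, c) :: t)) (acc : Int) :
    ∃ rs', maxStep ((v, c) :: t, acc) = some (rs', acc + v) ∧ RunsOK rs' ∧
      PySem.List.sorted (if v - 1 > 0 then expand ((v, c - 1) :: t) ++ [v - 1]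
                         else expand ((v, c - 1) :: t)) (fun x => x) = expand rs' := by
  cases h with
  | cons hc hlt ht =>
  by_cases hgt : v - 1 > 0
  · -- v ≥ 2 : the popped v is reinserted as v-1
    have hgt1 : (1 : Int) < v := by omega
    by_cases hc1 : c = 1
    · subst hc1
      have hexp0 : expand (((v : Int), (1 : Int) - 1) :: t) = expand t := by
        simp [expand]
      match t, hlt, ht with
      | [], hlt, ht =>
        refine ⟨[(v - 1, 1)], ?_, ?_, ?_⟩
        · simp [maxStep, hgt, hgt1]
        · exact RunsOK.cons le_rfl (by simp) RunsOK.nil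
        · rw [if_pos hgt, hexp0]
          have hrs : RunsOK [((v : Int) - 1, (1 : Int))] :=
            RunsOK.cons le_rfl (by simp) RunsOK.nil
          have hpw := expand_pairwise hrs
          simp only [expand] at hpw ⊢
          exact PySem.List.sorted_eq_self_of_pairwise _ _ (by simpa using hpw)
      | (w, d) :: t2, hlt, ht =>
        cases ht with
        | cons hd hlt2 ht2 =>
        by_cases hw : w = v - 1
        · subst hw
          refine ⟨(v - 1, d + 1) :: t2, ?_, ?_, ?_⟩
          · simp [maxStep, hgt, hgt1]
          · exact RunsOK.cons (by omega) hlt2 ht2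
          · rw [if_pos hgt, hexp0]
            have hsplit := expand_cons_split (v - 1) (d + 1) t2 (by omega)
            have hd1 : d + 1 - 1 = d := by ring
            rw [hd1] at hsplit
            rw [hsplit]
            have hrs : RunsOK ((v - 1, d + 1) :: t2) := RunsOK.cons (by omega) hlt2 ht2
            have hpw := expand_pairwise hrs
            rw [hsplit] at hpw
            exact PySem.List.sorted_eq_self_of_pairwise _ _ hpw
        · refine ⟨(v - 1, 1) :: (w, d) :: t2, ?_, ?_, ?_⟩
          · simp [maxStep, hgt, hgt1, hw]
          · refine RunsOK.cons le_rfl ?_ (RunsOK.cons hd hlt2 ht2)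
            intro q hq
            rcases List.mem_cons.mp hq with rfl | hq2
            · have := hlt (w, d) List.mem_cons_self; omega
            · have h1 := hlt2 q hq2
              have h2 := hlt (w, d) List.mem_cons_self
              omega
          · rw [if_pos hgt, hexp0]
            have hrs : RunsOK ((v - 1, 1) :: (w, d) :: t2) := by
              refine RunsOK.cons le_rfl ?_ (RunsOK.cons hd hlt2 ht2)
              intro q hq
              rcases List.mem_cons.mp hq with rfl | hq2
              · have := hlt (w, d) List.mem_cons_self; omega
              · have h1 := hlt2 q hq2
                have h2 := hlt (w, d) List.mem_cons_self
                omega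
            have hpw := expand_pairwise hrs
            have hone : expand ((v - 1, (1 : Int)) :: (w, d) :: t2)
                = expand ((w, d) :: t2) ++ [v - 1] := by
              simp [expand]
            rw [hone] at hpw ⊢
            exact PySem.List.sorted_eq_self_of_pairwise _ _ hpw
    · -- c ≥ 2 : a copy of v stays on top, v-1 goes underneath it
      have hc2 : 2 ≤ c := by omega
      have hEdef : expand (((v : Int), c - 1) :: t)
          = expand t ++ List.replicate (c - 1).toNat v := rfl
      match t, hlt, ht with
      | [], hlt, ht =>
        refine ⟨[(v, c - 1), (v - 1, 1)], ?_, ?_, ?_⟩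
        · simp [maxStep, hgt, hgt1, hc1]
        · refine RunsOK.cons (by omega) ?_ (RunsOK.cons le_rfl (by simp) RunsOK.nil)
          intro q hq
          rcases List.mem_cons.mp hq with rfl | hq2
          · omega
          · simp at hq2
        · rw [if_pos hgt]
          have hrs : RunsOK [((v : Int), c - 1), (v - 1, 1)] := by
            refine RunsOK.cons (by omega) ?_ (RunsOK.cons le_rfl (by simp) RunsOK.nil)
            intro q hq
            rcases List.mem_cons.mp hq with rfl | hq2
            · omega
            · simp at hq2
          have hperm : (expand [((v : Int), c - 1), (v - 1, 1)]).Perm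
              (expand (((v : Int), c - 1) :: ([] : List (Int × Int))) ++ [v - 1]) := by
            simp only [expand, List.nil_append, List.append_nil]
            have h1 : (1 : Int).toNat = 1 := rfl
            rw [h1]
            calc (List.replicate 1 (v-1) ++ List.replicate (c-1).toNat v).Perm
                  (List.replicate (c-1).toNat v ++ List.replicate 1 (v-1)) := List.perm_append_comm
              _ = List.replicate (c-1).toNat v ++ [v-1] := rfl
          exact PySem.List.sorted_id_eq_of_perm_of_pairwise _ _ hperm (expand_pairwise hrs)
      | (w, d) :: t2, hlt, ht =>
        cases ht with
        | cons hd hlt2 ht2 =>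
        by_cases hw : w = v - 1
        · subst hw
          refine ⟨(v, c - 1) :: (v - 1, d + 1) :: t2, ?_, ?_, ?_⟩
          · simp [maxStep, hgt, hgt1, hc1]
          · refine RunsOK.cons (by omega) ?_ (RunsOK.cons (by omega) hlt2 ht2)
            intro q hq
            rcases List.mem_cons.mp hq with rfl | hq2
            · omega
            · have := hlt2 q hq2; omega
          · rw [if_pos hgt]
            have hrs : RunsOK ((v, c - 1) :: (v - 1, d + 1) :: t2) := by
              refine RunsOK.cons (by omega) ?_ (RunsOK.cons (by omega) hlt2 ht2)
              intro q hq
              rcases List.mem_cons.mp hq with rfl | hq2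
              · omega
              · have := hlt2 q hq2; omega
            have hsplit := expand_cons_split (v - 1) (d + 1) t2 (by omega)
            have hd1 : d + 1 - 1 = d := by ring
            rw [hd1] at hsplit
            have hperm : (expand ((v, c - 1) :: (v - 1, d + 1) :: t2)).Perm
                (expand (((v : Int), c - 1) :: ((v - 1, d) :: t2)) ++ [v - 1]) := by
              show ((expand ((v - 1, d + 1) :: t2)) ++ List.replicate (c - 1).toNat v).Perm _
              rw [hsplit]
              show ((expand ((v - 1, d) :: t2) ++ [v - 1]) ++ List.replicate (c - 1).toNat v).Perm
                ((expand ((v - 1, d) :: t2) ++ List.replicate (c - 1).toNat v) ++ [v - 1])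
              rw [List.append_assoc, List.append_assoc]
              exact List.Perm.append_left _ List.perm_append_comm
            exact PySem.List.sorted_id_eq_of_perm_of_pairwise _ _ hperm (expand_pairwise hrs)
        · refine ⟨(v, c - 1) :: (v - 1, 1) :: (w, d) :: t2, ?_, ?_, ?_⟩
          · simp [maxStep, hgt, hgt1, hc1, hw]
          · refine RunsOK.cons (by omega) ?_ ?_
            · intro q hq
              rcases List.mem_cons.mp hq with rfl | hq2
              · omega
              · have := hlt q hq2; omega
            · refine RunsOK.cons le_rfl ?_ (RunsOK.cons hd hlt2 ht2)
              intro q hq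
              rcases List.mem_cons.mp hq with rfl | hq2
              · have := hlt (w, d) List.mem_cons_self; omega
              · have h1 := hlt2 q hq2
                have h2 := hlt (w, d) List.mem_cons_self
                omega
          · rw [if_pos hgt]
            have hrs : RunsOK ((v, c - 1) :: (v - 1, 1) :: (w, d) :: t2) := by
              refine RunsOK.cons (by omega) ?_ ?_
              · intro q hq
                rcases List.mem_cons.mp hq with rfl | hq2
                · omega
                · have := hlt q hq2; omega
              · refine RunsOK.cons le_rfl ?_ (RunsOK.cons hd hlt2 ht2)
                intro q hq
                rcases List.mem_cons.mp hq with rfl | hq2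
                · have := hlt (w, d) List.mem_cons_self; omega
                · have h1 := hlt2 q hq2
                  have h2 := hlt (w, d) List.mem_cons_self
                  omega
            have hone : expand ((v, c - 1) :: (v - 1, 1) :: (w, d) :: t2)
                = (expand ((w, d) :: t2) ++ [v - 1]) ++ List.replicate (c - 1).toNat v := by
              simp [expand]
            have hperm : (expand ((v, c - 1) :: (v - 1, 1) :: (w, d) :: t2)).Perm
                (expand (((v : Int), c - 1) :: ((w, d) :: t2)) ++ [v - 1]) := by
              rw [hone]
              show ((expand ((w, d) :: t2) ++ [v - 1]) ++ List.replicate (c - 1).toNat v).Perm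
                ((expand ((w, d) :: t2) ++ List.replicate (c - 1).toNat v) ++ [v - 1])
              rw [List.append_assoc, List.append_assoc]
              exact List.Perm.append_left _ List.perm_append_comm
            exact PySem.List.sorted_id_eq_of_perm_of_pairwise _ _ hperm (expand_pairwise hrs)
  · -- v ≤ 1 : the popped v is discarded
    have hgt1 : ¬ (1 : Int) < v := by omega
    by_cases hc1 : c = 1
    · subst hc1
      refine ⟨t, ?_, ht, ?_⟩
      · simp [maxStep, hgt, hgt1]
      · rw [if_neg hgt]
        have hexp0 : expand (((v : Int), (1 : Int) - 1) :: t) = expand t := by simp [expand]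
        rw [hexp0]
        exact PySem.List.sorted_eq_self_of_pairwise _ _ (expand_pairwise ht)
    · refine ⟨(v, c - 1) :: t, ?_, RunsOK.cons (by omega) hlt ht, ?_⟩
      · simp [maxStep, hgt, hgt1, hc1]
      · rw [if_neg hgt]
        exact PySem.List.sorted_eq_self_of_pairwise _ _
          (expand_pairwise (RunsOK.cons (by omega) hlt ht))

theorem maxEquiv (n : Nat) :
    ∀ (rs : List (Int × Int)) (acc : Int), RunsOK rs →
      iterOpt stepAmax n (expand rs, acc)
        = (iterOpt maxStep n (rs, acc)).map (fun s => (expand s.1, s.2)) := by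
  induction n with
  | zero => intro rs acc _; simp [iterOpt]
  | succ n ih =>
    intro rs acc hok
    cases hok with
    | nil => simp [iterOpt, stepAmax, maxStep, expand, PySem.List.pop?]
    | @cons v c t hc hlt ht =>
      have hsplit := expand_cons_split v c t hc
      have hpop : PySem.List.pop? (expand ((v, c) :: t)) = some (v, expand ((v, c - 1) :: t)) := by
        rw [hsplit]; exact PySem.List.pop?_last _ _
      obtain ⟨rs', hstep, hok', hsorted⟩ := maxStep_sim (RunsOK.cons hc hlt ht) acc
      simp only [iterOpt, stepAmax, hpop, Option.bind_some, hstep, Option.map_some]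
      rw [hsorted]
      exact ih rs' (acc + v) hok'

theorem mem_runPush {rs : List (Int × Int)} {v : Int} {q : Int × Int}
    (h : q ∈ runPush rs v) : q.1 = v ∨ ∃ p ∈ rs, q.1 = p.1 := by
  cases rs with
  | nil => simp [runPush] at h; simp [h]
  | cons p t =>
    obtain ⟨w, c⟩ := p
    by_cases hw : w = v
    · simp only [runPush, if_pos hw] at h
      rcases List.mem_cons.mp h with rfl | hq
      · exact Or.inl hw
      · exact Or.inr ⟨q, List.mem_cons_of_mem _ hq, rfl⟩
    · simp only [runPush, if_neg hw] at h
      rcases List.mem_cons.mp h with rfl | hq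
      · exact Or.inl rfl
      · exact Or.inr ⟨q, hq, rfl⟩

theorem runPush_spec {rs : List (Int × Int)} {v : Int} (h : RunsOK rs)
    (hle : ∀ q ∈ rs, q.1 ≤ v) :
    RunsOK (runPush rs v) ∧ expand (runPush rs v) = expand rs ++ [v] := by
  cases h with
  | nil =>
    constructor
    · exact RunsOK.cons le_rfl (by simp) RunsOK.nil
    · simp [runPush, expand]
  | @cons w c t hc hlt ht =>
    have hwv : w ≤ v := hle (w, c) List.mem_cons_self
    by_cases hw : w = v
    · subst hw
      simp only [runPush, if_pos rfl]
      constructor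
      · exact RunsOK.cons (by omega) hlt ht
      · have := expand_cons_split w (c + 1) t (by omega)
        simpa using this
    · simp only [runPush, if_neg hw]
      constructor
      · refine RunsOK.cons le_rfl ?_ (RunsOK.cons hc hlt ht)
        intro q hq
        rcases List.mem_cons.mp hq with rfl | hq2
        · exact lt_of_le_of_ne hwv hw
        · exact lt_of_lt_of_le (hlt q hq2) hwv
      · simp [expand]

theorem buildRuns_spec : ∀ (s : List Int) (rs : List (Int × Int)), RunsOK rs →
    s.Pairwise (· ≤ ·) → (∀ x ∈ s, ∀ q ∈ rs, q.1 ≤ x) →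
    RunsOK (s.foldl runPush rs) ∧ expand (s.foldl runPush rs) = expand rs ++ s := by
  intro s
  induction s with
  | nil => intro rs h _ _; exact ⟨h, by simp⟩
  | cons v s' ih =>
    intro rs h hpw hle
    obtain ⟨hok1, hexp1⟩ := runPush_spec h (fun q hq => hle v List.mem_cons_self q hq)
    have hpw' := (List.pairwise_cons.mp hpw).2
    have hhead := (List.pairwise_cons.mp hpw).1
    have hle' : ∀ x ∈ s', ∀ q ∈ runPush rs v, q.1 ≤ x := by
      intro x hx q hq
      rcases mem_runPush hq with h1 | ⟨p, hp, h1⟩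
      · rw [h1]; exact hhead x hx
      · rw [h1]; exact hle x (List.mem_cons_of_mem _ hx) p hp
    obtain ⟨hok2, hexp2⟩ := ih (runPush rs v) hok1 hpw' hle'
    rw [List.foldl_cons]
    refine ⟨hok2, ?_⟩
    rw [hexp2, hexp1]
    simp

-- A's heap min loop agrees (in the accumulator) with the head loop on the sorted list
theorem minEquiv (n : Nat) :
    ∀ (h s : List Int) (acc : Int), h.Perm s → s.Pairwise (· ≤ ·) →
      (iterOpt stepAmin n (h, acc)).map Prod.snd
        = (iterOpt headStep n (s, acc)).map Prod.snd := by
  induction n with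
  | zero => intro h s acc _ _; simp [iterOpt]
  | succ n ih =>
    intro h s acc hperm hpw
    cases s with
    | nil =>
      have hnil : h = [] := hperm.eq_nil
      subst hnil
      have hmin : PySem.List.min? ([] : List Int) (fun y => y) = none :=
        (PySem.List.min?_eq_none_iff _ _).2 rfl
      simp [iterOpt, stepAmin, headStep, hpop?, hmin]
    | cons m t =>
      have hne : h ≠ [] := by
        intro hh; subst hh
        exact absurd hperm.symm.eq_nil (by simp)
      obtain ⟨x, hx⟩ : ∃ x, PySem.List.min? h (fun y => y) = some x := by
        cases hmin : PySem.List.min? h (fun y => y) with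
        | none => exact absurd ((PySem.List.min?_eq_none_iff _ _).1 hmin) hne
        | some x => exact ⟨x, rfl⟩
      have hhead := (List.pairwise_cons.mp hpw).1
      have htpw := (List.pairwise_cons.mp hpw).2
      have hxm : x = m := by
        have hxmem : x ∈ h := PySem.List.min?_mem hx
        have hxs : x ∈ m :: t := hperm.mem_iff.mp hxmem
        have hmh : m ∈ h := hperm.mem_iff.mpr List.mem_cons_self
        have h1 : x ≤ m := PySem.List.min?_isMin hx m hmh
        rcases List.mem_cons.mp hxs with rfl | hxt
        · rfl
        · have := hhead x hxt; omega
      subst hxm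
      simp only [iterOpt, stepAmin, headStep, hpop?, hx, Option.bind_some]
      have herase : (h.erase x).Perm t := by
        have h2 := hperm.erase x
        rwa [List.erase_cons_head] at h2
      by_cases hgt : x - 1 > 0
      · simp only [if_pos hgt]
        apply ih
        · show (hpush (h.erase x) (x - 1)).Perm ((x - 1) :: t)
          exact (List.perm_append_singleton _ _).trans (herase.cons _)
        · exact List.pairwise_cons.mpr ⟨fun y hy => by have := hhead y hy; omega, htpw⟩
      · simp only [if_neg hgt]
        exact ih _ _ _ herase htpw

theorem partialDrain (k : Nat) :
    ∀ (v : Int) (rest : List Int) (acc : Int), (k : Int) < v →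
      iterOpt headStep k (v :: rest, acc)
        = some ((v - k) :: rest, acc + k * v - PySem.Int.floordiv ((k : Int) * ((k : Int) - 1)) 2) := by
  induction k with
  | zero =>
    intro v rest acc _
    rw [PySem.Int.floordiv_eq_ediv_of_pos (by norm_num)]
    norm_num [iterOpt]
  | succ k ih =>
    intro v rest acc hkv
    have hv2 : 2 ≤ v := by push_cast at hkv ⊢; omega
    have h1 : k + 1 = 1 + k := by omega
    rw [h1, iterOpt_add]
    have hstep : iterOpt headStep 1 (v :: rest, acc) = some ((v - 1) :: rest, acc + v) := by
      have hgt : (1 : Int) < v := by omega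
      simp [iterOpt, headStep, hgt]
    rw [hstep]
    have hkv' : (k : Int) < v - 1 := by push_cast at hkv ⊢; omega
    simp only [Option.bind_some]
    rw [ih (v - 1) rest (acc + v) hkv']
    rw [PySem.Int.floordiv_eq_ediv_of_pos (by norm_num : (0:Int) < 2),
        PySem.Int.floordiv_eq_ediv_of_pos (by norm_num : (0:Int) < 2)]
    push_cast
    have hdiv : (1 + (k:Int)) * (1 + (k:Int) - 1) = (k:Int) * ((k:Int) - 1) + (k:Int) * 2 := by ring
    rw [hdiv, Int.add_mul_ediv_right _ _ (by norm_num : (2:Int) ≠ 0)]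
    refine congrArg some (Prod.ext ?_ ?_)
    · simp only []
      congr 1
      ring
    · simp only []
      ring

theorem fullDrain (v : Int) (rest : List Int) (acc : Int) (hv : 2 ≤ v) :
    iterOpt headStep v.toNat (v :: rest, acc)
      = some (rest, acc + PySem.Int.floordiv (v * (v + 1)) 2) := by
  have h1 : v.toNat = (v.toNat - 1) + 1 := by omega
  rw [h1, iterOpt_add]
  have hcast : ((v.toNat - 1 : Nat) : Int) = v - 1 := by omega
  have hlt : ((v.toNat - 1 : Nat) : Int) < v := by omega
  rw [partialDrain _ v rest acc hlt, hcast]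
  have h2 : v - (v - 1) = 1 := by ring
  rw [h2]
  have hstep : iterOpt headStep 1 ((1 : Int) :: rest, acc + (v - 1) * v - PySem.Int.floordiv ((v - 1) * (v - 1 - 1)) 2)
      = some (rest, acc + (v - 1) * v - PySem.Int.floordiv ((v - 1) * (v - 1 - 1)) 2 + 1) := by
    simp [iterOpt, headStep]
  simp only [Option.bind_some]
  rw [hstep]
  rw [PySem.Int.floordiv_eq_ediv_of_pos (by norm_num : (0:Int) < 2),
      PySem.Int.floordiv_eq_ediv_of_pos (by norm_num : (0:Int) < 2)]
  have hdiv : v * (v + 1) = (v - 1) * (v - 1 - 1) + (2 * v - 1) * 2 := by ring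
  rw [hdiv, Int.add_mul_ediv_right _ _ (by norm_num : (2:Int) ≠ 0)]
  refine congrArg some (Prod.ext rfl ?_)
  have he : Even ((v - 1) * (v - 1 - 1)) := by
    have h := Int.even_mul_succ_self (v - 1 - 1)
    have h2 : (v - 1 - 1) * (v - 1 - 1 + 1) = (v - 1) * (v - 1 - 1) := by ring
    rwa [h2] at h
  have hD := Int.two_mul_ediv_two_of_even he
  simp only []
  ring_nf
  ring_nf at hD
  linarith

theorem minScan_main : ∀ (s : List Int), s.Pairwise (· ≤ ·) →
    ∀ (n : Nat) (acc : Int), (n : Int) ≤ totalCost s →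
      (iterOpt headStep n (s, acc)).map Prod.snd = some (minScan s (n : Int) acc) := by
  intro s
  induction s with
  | nil =>
    intro _ n acc hle
    have hn : n = 0 := by
      simp only [totalCost, List.map_nil, List.sum_nil] at hle; omega
    subst hn
    simp [iterOpt, minScan]
  | cons v rest ih =>
    intro hpw n acc hle
    have htpw := (List.pairwise_cons.mp hpw).2
    have htc : totalCost (v :: rest) = max v 1 + totalCost rest := by simp [totalCost]
    cases n with
    | zero => simp [iterOpt, minScan]
    | succ n =>
      have hpos : ¬ ((n + 1 : Nat) : Int) ≤ 0 := by push_cast; omega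
      by_cases hv : v ≤ 1
      · -- cost 1: one pop of v, the element is gone
        have hv1 : ¬ (1 : Int) < v := by omega
        simp only [iterOpt]
        have hstep : headStep (v :: rest, acc) = some (rest, acc + v) := by
          simp [headStep, hv1]
        rw [hstep]
        simp only [Option.bind_some]
        rw [ih htpw n (acc + v) (by rw [htc] at hle; push_cast at hle ⊢; omega)]
        have hone : (1 : Int) ≤ ((n + 1 : Nat) : Int) := by push_cast; omega
        have hb : ((n + 1 : Nat) : Int) - 1 = (n : Int) := by push_cast; ring
        have hrhs : minScan (v :: rest) ((n + 1 : Nat) : Int) acc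
            = minScan rest ((n : Nat) : Int) (acc + v) := by
          simp only [minScan]
          rw [if_neg hpos, if_neg hv1, if_pos hone, if_pos hv, hb]
        rw [hrhs]
      · have hv2 : 2 ≤ v := by omega
        have hgt : (1 : Int) < v := by omega
        have hnle : ¬ v ≤ 1 := by omega
        by_cases hnv : v ≤ ((n + 1 : Nat) : Int)
        · -- enough budget: the whole element drains, closed form v(v+1)/2
          have h1 : n + 1 = v.toNat + ((n + 1) - v.toNat) := by omega
          conv_lhs => rw [h1]
          rw [iterOpt_add, fullDrain v rest acc hv2]
          simp only [Option.bind_some]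
          rw [ih htpw ((n + 1) - v.toNat) (acc + PySem.Int.floordiv (v * (v + 1)) 2)
            (by rw [htc] at hle; push_cast at hle ⊢; omega)]
          have hb : (((n + 1) - v.toNat : Nat) : Int) = ((n + 1 : Nat) : Int) - v := by
            push_cast; omega
          have hrhs : minScan (v :: rest) ((n + 1 : Nat) : Int) acc
              = minScan rest (((n + 1 : Nat) : Int) - v)
                  (acc + PySem.Int.floordiv (v * (v + 1)) 2) := by
            simp only [minScan]
            rw [if_neg hpos, if_pos hgt, if_pos hnv, if_neg hnle]
          rw [hrhs, hb]
        · -- budget runs out inside this element: partial triangular sum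
          have hlt2 : ((n + 1 : Nat) : Int) < v := by omega
          rw [partialDrain (n + 1) v rest acc hlt2]
          simp only [Option.map_some]
          have hrhs : minScan (v :: rest) ((n + 1 : Nat) : Int) acc
              = acc + ((n + 1 : Nat) : Int) * v
                  - PySem.Int.floordiv (((n + 1 : Nat) : Int) * (((n + 1 : Nat) : Int) - 1)) 2 := by
            simp only [minScan]
            rw [if_neg hpos, if_pos hgt, if_neg hnv]
          rw [hrhs]

theorem minScan_nonpos (s : List Int) (b acc : Int) (hb : b ≤ 0) :
    minScan s b acc = acc := by
  cases s with
  | nil => rfl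
  | cons v rest => simp [minScan, hb]

theorem stepAmax_total (n : Nat) :
    ∀ (arr : List Int) (acc : Int), (n : Int) ≤ totalCost arr →
      (iterOpt stepAmax n (arr, acc)).isSome := by
  induction n with
  | zero => intro arr acc _; simp [iterOpt]
  | succ n ih =>
    intro arr acc hle
    have hne : arr ≠ [] := by
      intro hh; subst hh
      simp only [totalCost, List.map_nil, List.sum_nil] at hle
      push_cast at hle; omega
    obtain ⟨a, l, hsplit⟩ : ∃ a l, arr = l ++ [a] :=
      ⟨arr.getLast hne, arr.dropLast, (List.dropLast_append_getLast hne).symm⟩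
    subst hsplit
    have hpop : PySem.List.pop? (l ++ [a]) = some (a, l) := PySem.List.pop?_last l a
    simp only [iterOpt, stepAmax, hpop, Option.bind_some]
    apply ih
    have htc : totalCost (l ++ [a]) = totalCost l + max a 1 := by simp [totalCost]
    rw [htc] at hle
    by_cases hgt : a - 1 > 0
    · simp only [if_pos hgt]
      rw [totalCost_perm (PySem.List.sorted_perm _ _ _)]
      have h2 : totalCost (l ++ [a - 1]) = totalCost l + max (a - 1) 1 := by simp [totalCost]
      rw [h2]
      push_cast at hle ⊢
      omega
    · simp only [if_neg hgt]
      rw [totalCost_perm (PySem.List.sorted_perm _ _ _)]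
      push_cast at hle ⊢
      omega

-- ===== VERDICT (by name: the statement is the Claim_ definition above) =====
theorem solve_spec : Claim_equal_solve := by
  intro A B C _ hpre
  unfold Spec_solve
  show solve A B C = solve_alt A B C
  unfold solve solve_alt
  simp only [foldl_hpush, List.nil_append]
  have hstepA : stepA
      = fun s => (stepAmax s.1).bind (fun p => (stepAmin s.2).map (fun q => (p, q))) := rfl
  rw [hstepA, iterOpt_prod]
  have hpw : (PySem.List.sorted C (fun x => x)).Pairwise (· ≤ ·) := by
    have := PySem.List.sorted_pairwise C (fun x => x)
    simpa using this
  have hperm : C.Perm (PySem.List.sorted C (fun x => x)) :=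
    (PySem.List.sorted_perm _ _ _).symm
  have htcs : totalCost (PySem.List.sorted C (fun x => x)) = totalCost C :=
    totalCost_perm (PySem.List.sorted_perm _ _ _)
  obtain ⟨hok0, hexp0⟩ := buildRuns_spec (PySem.List.sorted C (fun x => x)) [] RunsOK.nil hpw
    (by intro x _ q hq; simp at hq)
  have hexp : expand (buildRuns (PySem.List.sorted C (fun x => x)))
      = PySem.List.sorted C (fun x => x) := by
    show expand ((PySem.List.sorted C (fun x => x)).foldl runPush []) = _
    rw [hexp0]; simp [expand]
  by_cases hA : 0 ≤ A
  · have hcast : ((A.toNat : Nat) : Int) = A := by omega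
    have hleA : ((A.toNat : Nat) : Int) ≤ totalCost C := by
      rw [hcast]; exact hpre
    have hmax := maxEquiv A.toNat (buildRuns (PySem.List.sorted C (fun x => x))) 0 hok0
    rw [hexp] at hmax
    have htotal := stepAmax_total A.toNat (PySem.List.sorted C (fun x => x)) 0
      (by rw [htcs]; exact hleA)
    have hmin := minEquiv A.toNat C (PySem.List.sorted C (fun x => x)) 0 hperm hpw
    have hminscan := minScan_main (PySem.List.sorted C (fun x => x)) hpw A.toNat 0
      (by rw [htcs]; exact hleA)
    rw [hminscan] at hmin
    cases hcase : iterOpt maxStep A.toNat (buildRuns (PySem.List.sorted C (fun x => x)), 0) with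
    | none =>
      rw [hcase] at hmax
      rw [hmax] at htotal
      simp at htotal
    | some pB =>
      obtain ⟨rsF, mx⟩ := pB
      rw [hcase] at hmax
      cases hmincase : iterOpt stepAmin A.toNat (C, 0) with
      | none => rw [hmincase] at hmin; simp at hmin
      | some pM =>
        obtain ⟨hF, mn⟩ := pM
        rw [hmincase] at hmin
        simp only [Option.map_some, Option.some_inj] at hmin
        rw [hcast] at hmin
        simp [hmin, hmax]
  · have h0 : A.toNat = 0 := by omega
    rw [h0]
    rw [minScan_nonpos (PySem.List.sorted C (fun x => x)) A 0 (by omega)]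
    simp [iterOpt]
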